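-- pv_equiv track=rewrite | github.com/31iwnl/tgbot | health_check.py | group_gaps
-- ===== SOURCE A (Python) =====
-- def group_gaps(gaps):
--     if not gaps:
--         return []
--     grouped = []
--     start, end, total = gaps[0]
--     for i in range(1, len(gaps)):
--         prev_end = gaps[i - 1][1]
--         curr_start, curr_end, curr_gap = gaps[i]
--         if curr_start == prev_end:
--             end = curr_end
--             total += curr_gap
--         else:
--             grouped.append((start, end, total))
--             start, end, total = curr_start, curr_end, curr_gap
--     grouped.append((start, end, total))
--     return grouped
-- ===== SOURCE B (Python) =====
-- def group_gaps(gaps):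
--     # Build the maximal adjacent runs first, then summarize each run.
--     if not gaps:
--         return []
--     runs = []
--     cur = [gaps[0]]
--     for g in gaps[1:]:
--         if g[0] == cur[-1][1]:
--             cur.append(g)
--         else:
--             runs.append(cur)
--             cur = [g]
--     runs.append(cur)
--     return [(r[0][0], r[-1][1], sum(t for _, _, t in r)) for r in runs]
-- ===== Notes on version B (the rewrite author's own statement) =====
-- stated objective: alternative
-- what changed: B first materializes the maximal adjacent runs as lists and then maps each run to (first start, last end, sum of gaps), instead of A's single pass that merges (start,end,total) in flight and emits on break.
import Mathlib
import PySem

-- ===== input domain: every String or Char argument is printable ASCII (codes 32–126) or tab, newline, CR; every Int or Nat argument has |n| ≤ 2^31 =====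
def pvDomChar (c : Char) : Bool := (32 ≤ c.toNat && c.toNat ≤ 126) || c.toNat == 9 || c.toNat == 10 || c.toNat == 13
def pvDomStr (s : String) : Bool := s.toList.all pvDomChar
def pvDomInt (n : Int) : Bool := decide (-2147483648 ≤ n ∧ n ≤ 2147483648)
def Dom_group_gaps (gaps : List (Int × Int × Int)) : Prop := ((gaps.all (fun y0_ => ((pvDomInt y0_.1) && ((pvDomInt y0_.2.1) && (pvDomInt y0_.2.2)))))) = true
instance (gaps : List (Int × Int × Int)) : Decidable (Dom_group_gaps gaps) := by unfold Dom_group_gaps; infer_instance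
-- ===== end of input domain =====

-- B builds the maximal adjacent runs as lists and then summarizes each run,
-- instead of A's in-flight merge of (start, end, total); alternative decomposition, same cost.

-- ===== PORT A =====
def group_gaps (gaps : List (Int × Int × Int)) : List (Int × Int × Int) :=
  if gaps = [] then []
  else
    let d : Int × Int × Int := (0, 0, 0)
    let g0 := PySem.List.pyGetD gaps 0 d
    let st := (PySem.List.pyRange 1 (PySem.List.len gaps) 1).foldl
      (fun (st : List (Int × Int × Int) × Int × Int × Int) i =>
        let prev_end := (PySem.List.pyGetD gaps (i - 1) d).2.1
        let c := PySem.List.pyGetD gaps i d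
        if c.1 = prev_end then (st.1, st.2.1, c.2.1, st.2.2.2 + c.2.2)
        else (st.1 ++ [(st.2.1, st.2.2.1, st.2.2.2)], c.1, c.2.1, c.2.2))
      ([], g0.1, g0.2.1, g0.2.2)
    st.1 ++ [(st.2.1, st.2.2.1, st.2.2.2)]

-- ===== PORT B =====
def group_gaps_alt (gaps : List (Int × Int × Int)) : List (Int × Int × Int) :=
  match gaps with
  | [] => []
  | g :: rest =>
    let d : Int × Int × Int := (0, 0, 0)
    let st := rest.foldl
      (fun (st : List (List (Int × Int × Int)) × List (Int × Int × Int)) x =>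
        if x.1 = (PySem.List.pyGetD st.2 (-1) d).2.1 then (st.1, st.2 ++ [x])
        else (st.1 ++ [st.2], [x]))
      ([], [g])
    (st.1 ++ [st.2]).map (fun r =>
      ((PySem.List.pyGetD r 0 d).1, (PySem.List.pyGetD r (-1) d).2.1,
        (r.map (fun p => p.2.2)).sum))

-- ===== PRECONDITION & SPEC =====
def Spec_group_gaps (gaps : List (Int × Int × Int)) (out : List (Int × Int × Int)) : Prop := out = group_gaps_alt gaps
instance (gaps : List (Int × Int × Int)) (out : List (Int × Int × Int)) : Decidable (Spec_group_gaps gaps out) := by unfold Spec_group_gaps; infer_instance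

-- ===== CLAIM (what is proved, stated in full; the proofs are below) =====
def Claim_equal_group_gaps : Prop := ∀ (gaps : List (Int × Int × Int)), Dom_group_gaps gaps → Spec_group_gaps gaps (group_gaps gaps)

-- ===== LEMMAS AND PROOFS =====

-- A's loop body, abstracted over the previous and current element
def stepA (st : List (Int × Int × Int) × Int × Int × Int) (prev c : Int × Int × Int) :
    List (Int × Int × Int) × Int × Int × Int :=
  if c.1 = prev.2.1 then (st.1, st.2.1, c.2.1, st.2.2.2 + c.2.2)
  else (st.1 ++ [(st.2.1, st.2.2.1, st.2.2.2)], c.1, c.2.1, c.2.2)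

-- B's loop body with the fixed default
def stepB (st : List (List (Int × Int × Int)) × List (Int × Int × Int)) (x : Int × Int × Int) :
    List (List (Int × Int × Int)) × List (Int × Int × Int) :=
  if x.1 = (PySem.List.pyGetD st.2 (-1) ((0, 0, 0) : Int × Int × Int)).2.1 then (st.1, st.2 ++ [x])
  else (st.1 ++ [st.2], [x])

def summ (r : List (Int × Int × Int)) : Int × Int × Int :=
  ((PySem.List.pyGetD r 0 ((0, 0, 0) : Int × Int × Int)).1,
   (PySem.List.pyGetD r (-1) ((0, 0, 0) : Int × Int × Int)).2.1,
   (r.map (fun p => p.2.2)).sum)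

-- fold over consecutive pairs, carrying the previous element
def auxP {S : Type} (F : S → (Int × Int × Int) → (Int × Int × Int) → S) :
    S → (Int × Int × Int) → List (Int × Int × Int) → S
  | init, _, [] => init
  | init, prev, x :: r => auxP F (F init prev x) x r

theorem L1 {S : Type} (F : S → (Int × Int × Int) → (Int × Int × Int) → S)
    (xs : List (Int × Int × Int)) (d : Int × Int × Int) :
    ∀ (n a : Nat) (init : S), xs.length - (a + 1) = n → a < xs.length →
      (PySem.List.pyRange ((a : Int) + 1) (PySem.List.len xs) 1).foldl
          (fun acc i => F acc (PySem.List.pyGetD xs (i - 1) d) (PySem.List.pyGetD xs i d)) init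
        = auxP F init (xs.getD a d) (xs.drop (a + 1)) := by
  intro n
  induction n with
  | zero =>
    intro a init hn ha
    have hlen : xs.length ≤ a + 1 := by omega
    rw [PySem.List.pyRange_one_eq_nil (by simp [PySem.List.len]; omega),
      List.drop_eq_nil_of_le hlen]
    simp [auxP]
  | succ n ih =>
    intro a init hn ha
    have hlt : a + 1 < xs.length := by omega
    rw [PySem.List.pyRange_one_cons (by simp [PySem.List.len]; omega)]
    rw [List.foldl_cons]
    have e1 : ((a : Int) + 1 - 1) = ((a : Nat) : Int) := by ring
    have e2 : ((a : Int) + 1) = (((a + 1 : Nat)) : Int) := by push_cast; ring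
    rw [e1, e2, PySem.List.pyGetD_natCast, PySem.List.pyGetD_natCast]
    have := ih (a + 1) (F init (xs.getD a d) (xs.getD (a + 1) d)) (by omega) hlt
    rw [show ((a + 1 : Nat) : Int) + 1 = (((a + 1 : Nat)) : Int) + 1 by push_cast; ring] at this ⊢
    rw [this]
    rw [List.drop_eq_getElem_cons hlt]
    rw [auxP]
    congr 1
    · rw [List.getD_eq_getElem xs d hlt]
    · rw [List.getD_eq_getElem xs d hlt]

-- characterization of port A on a nonempty list
theorem A_char (g : Int × Int × Int) (rest : List (Int × Int × Int)) :
    group_gaps (g :: rest)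
      = (let st := auxP stepA ([], g.1, g.2.1, g.2.2) g rest
         st.1 ++ [(st.2.1, st.2.2.1, st.2.2.2)]) := by
  unfold group_gaps
  rw [if_neg (by simp)]
  have h := L1 (S := List (Int × Int × Int) × Int × Int × Int) stepA (g :: rest) ((0,0,0) : Int × Int × Int)
    ((g :: rest).length - 1) 0 ([], g.1, g.2.1, g.2.2) rfl (by simp)
  simp only [Nat.cast_zero, zero_add, List.getD_cons_zero, List.drop_one, List.tail_cons] at h
  simp only [PySem.List.pyGetD_zero_cons]
  rw [show (fun (st : List (Int × Int × Int) × Int × Int × Int) (i : Int) =>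
        if (PySem.List.pyGetD (g :: rest) i ((0,0,0) : Int × Int × Int)).1
            = (PySem.List.pyGetD (g :: rest) (i - 1) ((0,0,0) : Int × Int × Int)).2.1 then
          (st.1, st.2.1, (PySem.List.pyGetD (g :: rest) i ((0,0,0) : Int × Int × Int)).2.1,
            st.2.2.2 + (PySem.List.pyGetD (g :: rest) i ((0,0,0) : Int × Int × Int)).2.2)
        else (st.1 ++ [(st.2.1, st.2.2.1, st.2.2.2)],
            (PySem.List.pyGetD (g :: rest) i ((0,0,0) : Int × Int × Int)).1,
            (PySem.List.pyGetD (g :: rest) i ((0,0,0) : Int × Int × Int)).2.1,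
            (PySem.List.pyGetD (g :: rest) i ((0,0,0) : Int × Int × Int)).2.2))
      = fun acc i => stepA acc (PySem.List.pyGetD (g :: rest) (i - 1) ((0,0,0) : Int × Int × Int))
          (PySem.List.pyGetD (g :: rest) i ((0,0,0) : Int × Int × Int)) from rfl]
  rw [h]

theorem pyGetD_neg_one_cons (x0 : Int × Int × Int) (cs : List (Int × Int × Int)) :
    PySem.List.pyGetD (x0 :: cs) (-1) ((0,0,0) : Int × Int × Int) = (x0 :: cs).getLast (by simp) :=
  PySem.List.pyGetD_neg_one (x0 :: cs) ((0,0,0) : Int × Int × Int) (by simp)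

theorem summ_cons (x0 : Int × Int × Int) (cs : List (Int × Int × Int)) :
    summ (x0 :: cs)
      = (x0.1, ((x0 :: cs).getLast (by simp)).2.1, ((x0 :: cs).map (fun p => p.2.2)).sum) := by
  unfold summ
  rw [pyGetD_neg_one_cons, PySem.List.pyGetD_zero_cons]

-- main invariant: A's in-flight state is the summary of B's current run
theorem L2 : ∀ (rest : List (Int × Int × Int)) (runs : List (List (Int × Int × Int)))
    (x0 : Int × Int × Int) (cs : List (Int × Int × Int)),
    (let st := auxP stepA
        (runs.map summ, x0.1, ((x0 :: cs).getLast (by simp)).2.1, ((x0 :: cs).map (fun p => p.2.2)).sum)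
        ((x0 :: cs).getLast (by simp)) rest
     st.1 ++ [(st.2.1, st.2.2.1, st.2.2.2)])
      = (let st := rest.foldl stepB (runs, x0 :: cs)
         (st.1 ++ [st.2]).map summ) := by
  intro rest
  induction rest with
  | nil =>
    intro runs x0 cs
    simp only [auxP, List.foldl_nil, List.map_append, List.map_cons, List.map_nil, summ_cons]
  | cons x rest ih =>
    intro runs x0 cs
    simp only [List.foldl_cons, auxP, stepA, stepB, pyGetD_neg_one_cons]
    by_cases hc : x.1 = ((x0 :: cs).getLast (by simp)).2.1
    · rw [if_pos hc, if_pos hc]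
      have hlast : (x0 :: (cs ++ [x])).getLast (by simp) = x :=
        List.getLast_append_singleton (x0 :: cs)
      have hsum : ((x0 :: (cs ++ [x])).map (fun p => p.2.2)).sum
          = ((x0 :: cs).map (fun p => p.2.2)).sum + x.2.2 := by
        simp only [List.map_cons, List.map_append, List.sum_cons, List.sum_append,
          List.map_nil, List.sum_nil]
        ring
      have h := ih runs x0 (cs ++ [x])
      rw [hlast, hsum] at h
      simp only [List.cons_append] at h ⊢
      exact h
    · rw [if_neg hc, if_neg hc]
      have := ih (runs ++ [x0 :: cs]) x []
      simp only [List.getLast_singleton, List.map_cons, List.map_nil, List.sum_cons,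
        List.sum_nil, Int.add_zero, List.map_append] at this
      simp only [List.map_append, List.map_cons, List.map_nil] at this ⊢
      rw [summ_cons] at this
      exact this

-- ===== VERDICT (by name: the statement is the Claim_ definition above) =====
theorem group_gaps_spec : Claim_equal_group_gaps := by
  unfold Claim_equal_group_gaps
  intro gaps _
  unfold Spec_group_gaps
  match gaps with
  | [] => rfl
  | g :: rest =>
    rw [A_char]
    unfold group_gaps_alt
    have h := L2 rest [] g []
    simp only [List.getLast_singleton, List.map_cons, List.map_nil, List.sum_cons,
      List.sum_nil, Int.add_zero] at h
    simp only []
    rw [h]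
    rfl
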